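-- pv_equiv track=rewrite | github.com/Chirudeva-Reddy/python-compiler | pipeline/phase08_optimizer.py | propagate_single_use_temporaries
-- ===== SOURCE A (Python) =====
-- from typing import TypeAlias
--
-- Quad: TypeAlias = tuple[str, str, str, str]
--
-- ARITHMETIC_OPERATORS: set[str] = {"+", "-", "*", "/", "%"}
--
-- RELATIONAL_OPERATORS: set[str] = {"<", ">", "<=", ">=", "==", "!="}
--
-- BOOLEAN_OPERATORS: set[str] = {"&&", "||"}
--
-- def propagate_single_use_temporaries(quads: list[Quad]) -> list[Quad]:
--     """Write simple temp expressions directly into their final assignment target."""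
--     use_counts = count_operand_uses(quads)
--     optimized: list[Quad] = []
--     index = 0
--
--     while index < len(quads):
--         current_quad = quads[index]
--
--         if index + 1 < len(quads) and can_merge_with_assignment(current_quad, quads[index + 1], use_counts):
--             op, arg1, arg2, _ = current_quad
--             _, _, _, final_result = quads[index + 1]
--             optimized.append((op, arg1, arg2, final_result))
--             index += 2
--             continue
--
--         optimized.append(current_quad)
--         index += 1
--
--     return optimized
--
-- def count_operand_uses(quads: list[Quad]) -> dict[str, int]:
--     """Count how many times each TAC value is read as an operand."""
--     counts: dict[str, int] = {}
--
--     for op, arg1, arg2, _ in quads: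
--         if op != "label" and arg1:
--             counts[arg1] = counts.get(arg1, 0) + 1
--         if arg2:
--             counts[arg2] = counts.get(arg2, 0) + 1
--
--     return counts
--
-- def can_merge_with_assignment(current_quad: Quad, next_quad: Quad, use_counts: dict[str, int]) -> bool:
--     """Return True when a temp-producing quad is immediately copied once."""
--     op, _, _, result = current_quad
--     next_op, next_arg1, _, next_result = next_quad
--
--     if op not in ARITHMETIC_OPERATORS and op not in RELATIONAL_OPERATORS and op not in BOOLEAN_OPERATORS:
--         return False
--     if next_op != "=":
--         return False
--     if not is_temporary(result):
--         return False
--     if next_arg1 != result: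
--         return False
--     if is_temporary(next_result):
--         return False
--     return use_counts.get(result, 0) == 1
--
-- def is_temporary(value: str) -> bool:
--     """Return whether a TAC value is a generated temporary name."""
--     if not value.startswith("t"):
--         return False
--     return value[1:].isdigit()
-- ===== SOURCE B (Python) =====
-- ARITHMETIC_OPERATORS = {"+", "-", "*", "/", "%"}
-- RELATIONAL_OPERATORS = {"<", ">", "<=", ">=", "==", "!="}
-- BOOLEAN_OPERATORS = {"&&", "||"}
--
--
-- def count_operand_uses(quads):
--     """Count how many times each TAC value is read as an operand."""
--     counts = {}
--     for op, arg1, arg2, _ in quads: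
--         if op != "label" and arg1:
--             counts[arg1] = counts.get(arg1, 0) + 1
--         if arg2:
--             counts[arg2] = counts.get(arg2, 0) + 1
--     return counts
--
--
-- def is_temporary(value):
--     """Return whether a TAC value is a generated temporary name."""
--     if not value.startswith("t"):
--         return False
--     return value[1:].isdigit()
--
--
-- def _can_merge(prev_quad, quad, use_counts):
--     """True when `quad` is a single-use copy of the expression quad `prev_quad`."""
--     op, _, _, result = prev_quad
--     next_op, next_arg1, _, next_result = quad
--     if op not in ARITHMETIC_OPERATORS and op not in RELATIONAL_OPERATORS and op not in BOOLEAN_OPERATORS: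
--         return False
--     if next_op != "=":
--         return False
--     if not is_temporary(result):
--         return False
--     if next_arg1 != result:
--         return False
--     if is_temporary(next_result):
--         return False
--     return use_counts.get(result, 0) == 1
--
--
-- def propagate_single_use_temporaries(quads):
--     """Write simple temp expressions directly into their final assignment target."""
--     use_counts = count_operand_uses(quads)
--     optimized = []
--     for quad in quads:
--         if optimized and _can_merge(optimized[-1], quad, use_counts):
--             op, arg1, arg2, _ = optimized.pop()
--             optimized.append((op, arg1, arg2, quad[3]))
--         else:
--             optimized.append(quad)
--     return optimized
-- ===== Notes on version B (the rewrite author's own statement) =====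
-- stated objective: alternative
-- what changed: Replaces A's index-based while-loop that peeks at quads[index+1] and skips two entries with a single forward for-loop that appends every quad and, when the current quad is a mergeable '=' copy of the previously emitted expression quad, pops that last emitted quad and pushes the merged quad instead (a retroactive rewrite of the output buffer); the helpers count_operand_uses/is_temporary and the merge predicate are reused unchanged.
import Mathlib
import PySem

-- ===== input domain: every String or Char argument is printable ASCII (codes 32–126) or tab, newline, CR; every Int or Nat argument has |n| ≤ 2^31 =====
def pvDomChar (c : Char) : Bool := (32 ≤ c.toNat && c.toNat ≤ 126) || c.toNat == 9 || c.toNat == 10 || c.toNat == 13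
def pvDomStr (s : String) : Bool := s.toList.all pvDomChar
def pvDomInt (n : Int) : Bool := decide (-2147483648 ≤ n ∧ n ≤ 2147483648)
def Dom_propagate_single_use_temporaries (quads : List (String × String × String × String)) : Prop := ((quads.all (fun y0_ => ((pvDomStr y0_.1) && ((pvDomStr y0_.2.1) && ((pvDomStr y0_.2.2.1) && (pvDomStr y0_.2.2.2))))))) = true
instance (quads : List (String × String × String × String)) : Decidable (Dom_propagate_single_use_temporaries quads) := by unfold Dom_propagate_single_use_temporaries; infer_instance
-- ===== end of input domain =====

-- B replaces A's index-based look-ahead (peek at quads[index+1], skip two) by a single forward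
-- pass that appends each quad and retroactively rewrites the last emitted quad when a merge applies
-- (objective: alternative decomposition; same O(n) cost). Return-value equivalence only (no mutation).

-- ===== PORT A =====
-- shared module-level helpers (Source B reuses them verbatim)
def pvArithOps : List String := ["+", "-", "*", "/", "%"]
def pvRelOps : List String := ["<", ">", "<=", ">=", "==", "!="]
def pvBoolOps : List String := ["&&", "||"]

def is_temporary (value : String) : Bool :=
  if ¬ PySem.Str.startswith value "t" then false
  else PySem.Str.strIsdigit (PySem.Str.slice value (some 1) none)

def count_operand_uses (quads : List (String × String × String × String)) :
    PySem.Dict String Int :=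
  quads.foldl
    (fun counts q =>
      let counts :=
        if q.1 ≠ "label" ∧ q.2.1 ≠ "" then counts.insert q.2.1 (counts.getD q.2.1 0 + 1)
        else counts
      if q.2.2.1 ≠ "" then counts.insert q.2.2.1 (counts.getD q.2.2.1 0 + 1) else counts)
    PySem.Dict.empty

def can_merge_with_assignment (current_quad next_quad : String × String × String × String)
    (use_counts : PySem.Dict String Int) : Bool :=
  if ¬ (current_quad.1 ∈ pvArithOps) ∧ ¬ (current_quad.1 ∈ pvRelOps) ∧
      ¬ (current_quad.1 ∈ pvBoolOps) then false
  else if next_quad.1 ≠ "=" then false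
  else if ¬ is_temporary current_quad.2.2.2 then false
  else if next_quad.2.1 ≠ current_quad.2.2.2 then false
  else if is_temporary next_quad.2.2.2 then false
  else use_counts.getD current_quad.2.2.2 0 == 1

-- A's while-loop over `index`: recursion on the remaining suffix of quads
def pvGoA (use_counts : PySem.Dict String Int) :
    List (String × String × String × String) → List (String × String × String × String)
  | [] => []
  | [q] => [q]
  | q1 :: q2 :: rest =>
    if can_merge_with_assignment q1 q2 use_counts then
      (q1.1, q1.2.1, q1.2.2.1, q2.2.2.2) :: pvGoA use_counts rest
    else
      q1 :: pvGoA use_counts (q2 :: rest)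

def propagate_single_use_temporaries (quads : List (String × String × String × String)) :
    List (String × String × String × String) :=
  pvGoA (count_operand_uses quads) quads

-- ===== PORT B =====
-- B's loop body: `optimized` kept in reverse (Python appends/pops at the right end)
def pvStepB (use_counts : PySem.Dict String Int)
    (optimizedRev : List (String × String × String × String))
    (quad : String × String × String × String) : List (String × String × String × String) :=
  match optimizedRev with
  | last :: restRev =>
    if can_merge_with_assignment last quad use_counts then
      (last.1, last.2.1, last.2.2.1, quad.2.2.2) :: restRev
    else
      quad :: last :: restRev
  | [] => [quad]

def propagate_single_use_temporaries_alt (quads : List (String × String × String × String)) :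
    List (String × String × String × String) :=
  (quads.foldl (pvStepB (count_operand_uses quads)) []).reverse

-- ===== PRECONDITION & SPEC =====
def Spec_propagate_single_use_temporaries (quads : List (String × String × String × String)) (out : List (String × String × String × String)) : Prop := out = propagate_single_use_temporaries_alt quads
instance (quads : List (String × String × String × String)) (out : List (String × String × String × String)) : Decidable (Spec_propagate_single_use_temporaries quads out) := by unfold Spec_propagate_single_use_temporaries; infer_instance

-- ===== CLAIM (what is proved, stated in full; the proofs are below) =====
def Claim_equal_propagate_single_use_temporaries : Prop := ∀ (quads : List (String × String × String × String)), Dom_propagate_single_use_temporaries quads → Spec_propagate_single_use_temporaries quads (propagate_single_use_temporaries quads)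

-- ===== LEMMAS AND PROOFS =====

-- a merged quad's result is the non-temporary target, so it can never merge again
lemma canMerge_result_nontemp {q1 q2 : String × String × String × String}
    {uc : PySem.Dict String Int} (h : can_merge_with_assignment q1 q2 uc = true) :
    is_temporary q2.2.2.2 = false := by
  unfold can_merge_with_assignment at h
  split_ifs at h
  simp_all

lemma canMerge_false_of_nontemp {q r : String × String × String × String}
    {uc : PySem.Dict String Int} (h : is_temporary q.2.2.2 = false) :
    can_merge_with_assignment q r uc = false := by
  unfold can_merge_with_assignment
  split_ifs <;> simp_all

-- B's fold, started from any buffer whose last element cannot merge with the next input quad,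
-- computes A's recursion (output accumulated in reverse)
lemma pv_fold_eq_goA (uc : PySem.Dict String Int) :
    ∀ (qs accRev : List (String × String × String × String)),
      (∀ last q, accRev.head? = some last → qs.head? = some q →
        can_merge_with_assignment last q uc = false) →
      List.foldl (pvStepB uc) accRev qs = (pvGoA uc qs).reverse ++ accRev := by
  intro qs
  induction qs using pvGoA.induct uc with
  | case1 => intro accRev _; simp [pvGoA]
  | case2 q =>
    intro accRev h
    cases accRev with
    | nil => simp [pvGoA, pvStepB]
    | cons last rest =>
      have hm := h last q rfl rfl
      simp [pvGoA, pvStepB, hm]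
  | case3 q1 q2 rest hmerge ih =>
    intro accRev h
    have hstep1 : pvStepB uc accRev q1 = q1 :: accRev := by
      cases accRev with
      | nil => rfl
      | cons last r => simp [pvStepB, h last q1 rfl rfl]
    have hnontemp := canMerge_result_nontemp hmerge
    have := ih ((q1.1, q1.2.1, q1.2.2.1, q2.2.2.2) :: accRev)
      (by
        intro last q hl hq
        cases hl
        exact canMerge_false_of_nontemp hnontemp)
    have hstep2 : pvStepB uc (q1 :: accRev) q2 = (q1.1, q1.2.1, q1.2.2.1, q2.2.2.2) :: accRev := by
      simp [pvStepB, hmerge]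
    rw [List.foldl_cons, hstep1, List.foldl_cons, hstep2, this]
    simp [pvGoA, hmerge]
  | case4 q1 q2 rest hmerge ih =>
    intro accRev h
    have hstep1 : pvStepB uc accRev q1 = q1 :: accRev := by
      cases accRev with
      | nil => rfl
      | cons last r => simp [pvStepB, h last q1 rfl rfl]
    have := ih (q1 :: accRev) (by intro last q hl hq; cases hl; cases hq; simpa using hmerge)
    rw [List.foldl_cons, hstep1, this]
    simp [pvGoA, hmerge]

-- ===== VERDICT (by name: the statement is the Claim_ definition above) =====
theorem propagate_single_use_temporaries_spec : Claim_equal_propagate_single_use_temporaries := by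
  intro quads _
  unfold Spec_propagate_single_use_temporaries
  unfold propagate_single_use_temporaries propagate_single_use_temporaries_alt
  rw [pv_fold_eq_goA (count_operand_uses quads) quads [] (by intro _ _ h; cases h)]
  simp
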